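-- pv_equiv track=rewrite | github.com/Sridhar98/FYP | ensembleMethod.py | convert2d
-- ===== SOURCE A (Python) =====
-- def convert2d(array) :
-- 	minArray = []
-- 	k=-1
-- 	for i in range(0, len(array)) :
-- 		if i%4 == 0 :
-- 			minArray.append([])
-- 			k=k+1
-- 			minArray[k].append(array[i])
-- 		else :
-- 			minArray[k].append(array[i])
-- 	return minArray
-- ===== SOURCE B (Python) =====
-- def convert2d(array):
--     # Chunk boundaries directly: one slice per group of four.
--     return [list(array[i:i+4]) for i in range(0, len(array), 4)]
-- ===== Notes on version B (the rewrite author's own statement) =====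
-- stated objective: idiomatic
-- what changed: B computes chunk boundaries directly with a stepped range and one slice per group of four, instead of A's per-element loop with an i%4 branch and a running chunk counter k.
import Mathlib
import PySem

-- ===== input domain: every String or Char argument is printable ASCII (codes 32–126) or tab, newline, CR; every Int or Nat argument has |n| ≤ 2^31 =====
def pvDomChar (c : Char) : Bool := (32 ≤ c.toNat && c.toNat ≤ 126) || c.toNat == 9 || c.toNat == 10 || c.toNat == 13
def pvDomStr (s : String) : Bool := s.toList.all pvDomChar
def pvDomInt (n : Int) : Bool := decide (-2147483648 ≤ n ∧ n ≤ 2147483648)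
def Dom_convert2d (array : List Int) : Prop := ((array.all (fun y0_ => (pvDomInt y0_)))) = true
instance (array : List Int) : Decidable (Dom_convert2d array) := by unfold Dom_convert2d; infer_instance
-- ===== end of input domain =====

-- B computes chunk boundaries directly (stepped range, one slice per group of four) instead of
-- A's per-element loop with an i%4 branch and a running chunk counter k; objective: idiomatic.

-- ===== PORT A =====
-- loop body of A: state is (minArray, k); minArray[k].append(x) is List.modify at k
-- (k ≥ 0 whenever the modify is reached, so .toNat is exact there)
def convert2dStep (array : List Int) (st : List (List Int) × Int) (i : Int) :
    List (List Int) × Int :=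
  if PySem.Int.mod i 4 == 0 then
    let m := st.1 ++ [([] : List Int)]
    let k := st.2 + 1
    (m.modify k.toNat (fun c => c ++ [PySem.List.pyGetD array i 0]), k)
  else
    (st.1.modify st.2.toNat (fun c => c ++ [PySem.List.pyGetD array i 0]), st.2)

def convert2d (array : List Int) : List (List Int) :=
  ((PySem.List.pyRange 0 (array.length : Int) 1).foldl (convert2dStep array) ([], -1)).1

-- ===== PORT B =====
def convert2d_alt (array : List Int) : List (List Int) :=
  (PySem.List.pyRange 0 (array.length : Int) 4).map
    (fun i => PySem.List.slice array (some i) (some (i + 4)))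

-- ===== PRECONDITION & SPEC =====
def Spec_convert2d (array : List Int) (out : List (List Int)) : Prop := out = convert2d_alt array
instance (array : List Int) (out : List (List Int)) : Decidable (Spec_convert2d array out) := by unfold Spec_convert2d; infer_instance

-- ===== CLAIM (what is proved, stated in full; the proofs are below) =====
def Claim_equal_convert2d : Prop := ∀ (array : List Int), Dom_convert2d array → Spec_convert2d array (convert2d array)

-- ===== LEMMAS AND PROOFS =====

-- proof-only helper: the chunking both ports compute, as a take/drop recursion
def chunkRec (l : List Int) : List (List Int) :=
  match l with
  | [] => []
  | x :: xs => (x :: xs).take 4 :: chunkRec (xs.drop 3)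
termination_by l.length
decreasing_by simp

lemma chunk_nil : chunkRec [] = [] := by
  unfold chunkRec
  rfl

lemma chunk_cons (x : Int) (xs : List Int) :
    chunkRec (x :: xs) = (x :: xs).take 4 :: chunkRec (xs.drop 3) := by
  conv_lhs => unfold chunkRec

lemma chunk_length_aux : ∀ (n : Nat) (l : List Int), l.length ≤ n →
    (chunkRec l).length = (l.length + 3) / 4 := by
  intro n
  induction n with
  | zero =>
    intro l hl
    have : l = [] := List.eq_nil_of_length_eq_zero (by omega)
    subst this; simp [chunk_nil]
  | succ n ih =>
    intro l hl
    match l with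
    | [] => simp [chunk_nil]
    | x :: xs =>
      rw [chunk_cons]
      have hd : (xs.drop 3).length = xs.length - 3 := by simp
      have := ih (xs.drop 3) (by simp at hl ⊢; omega)
      simp only [List.length_cons, this, hd] at *
      omega

lemma chunk_length (l : List Int) : (chunkRec l).length = (l.length + 3) / 4 :=
  chunk_length_aux l.length l le_rfl

lemma modify_append_self {α : Type} (L : List α) (c : α) (f : α → α) :
    (L ++ [c]).modify L.length f = L ++ [f c] := by
  induction L with
  | nil => simp [List.modify_cons]
  | cons a L ih => simp [ih]

lemma chunk_append_aux : ∀ (n : Nat) (l : List Int) (x : Int), l.length ≤ n →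
    chunkRec (l ++ [x]) =
      if l.length % 4 = 0 then chunkRec l ++ [[x]]
      else (chunkRec l).modify ((chunkRec l).length - 1) (fun c => c ++ [x]) := by
  intro n
  induction n with
  | zero =>
    intro l x hl
    have : l = [] := List.eq_nil_of_length_eq_zero (by omega)
    subst this
    simp [chunk_nil, chunk_cons]
  | succ n ih =>
    intro l x hl
    match l with
    | [] => simp [chunk_nil, chunk_cons]
    | y :: ys =>
      by_cases h3 : ys.length < 3
      · -- whole list (length ≤ 4) is one chunk
        have hne : (y :: ys).length % 4 ≠ 0 := by simp; omega
        rw [if_neg hne, List.cons_append]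
        rw [chunk_cons y (ys ++ [x]), chunk_cons y ys]
        have hdrop1 : (ys ++ [x]).drop 3 = [] := by
          apply List.drop_eq_nil_of_le; simp; omega
        have hdrop2 : ys.drop 3 = [] := by
          apply List.drop_eq_nil_of_le; omega
        rw [hdrop1, hdrop2]
        have htake1 : (y :: (ys ++ [x])).take 4 = y :: (ys ++ [x]) := by
          apply List.take_of_length_le; simp; omega
        have htake2 : (y :: ys).take 4 = y :: ys := by
          apply List.take_of_length_le; simp; omega
        rw [htake1, htake2]
        simp [chunk_nil, List.modify_cons]
      · -- long list: first chunk unchanged, recurse past the first 3 of ys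
        have h3' : 3 ≤ ys.length := by omega
        have htake : (y :: (ys ++ [x])).take 4 = (y :: ys).take 4 := by
          have h : (y :: (ys ++ [x])) = (y :: ys) ++ [x] := by simp
          rw [h, List.take_append_of_le_length (by simp; omega)]
        have hdrop : (ys ++ [x]).drop 3 = ys.drop 3 ++ [x] :=
          List.drop_append_of_le_length h3'
        have hmod : (ys.drop 3).length % 4 = (y :: ys).length % 4 := by
          rw [List.length_drop]
          simp only [List.length_cons]
          omega
        have ihd := ih (ys.drop 3) x (by simp at hl ⊢; omega)
        rw [List.cons_append, chunk_cons y (ys ++ [x]), hdrop, ihd, hmod, chunk_cons y ys, htake]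
        by_cases h0 : (y :: ys).length % 4 = 0
        · rw [if_pos h0, if_pos h0]
          simp
        · rw [if_neg h0, if_neg h0]
          have hne : ys.drop 3 ≠ [] := by
            intro he
            rw [he] at hmod
            simp only [List.length_nil, List.length_cons] at hmod h0
            omega
          have hge : 1 ≤ ys.length - 3 := by
            have := List.length_pos_of_ne_nil hne
            rw [List.length_drop] at this
            omega
          have hlen : 1 ≤ (chunkRec (ys.drop 3)).length := by
            rw [chunk_length, List.length_drop]
            omega
          rw [List.modify_cons]
          rw [if_neg (by simp only [List.length_cons]; omega)]
          have hidx : ((y :: ys).take 4 :: chunkRec (ys.drop 3)).length - 1 - 1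
              = (chunkRec (ys.drop 3)).length - 1 := by
            simp only [List.length_cons]
            omega
          rw [hidx]

lemma chunk_append (l : List Int) (x : Int) :
    chunkRec (l ++ [x]) =
      if l.length % 4 = 0 then chunkRec l ++ [[x]]
      else (chunkRec l).modify ((chunkRec l).length - 1) (fun c => c ++ [x]) :=
  chunk_append_aux l.length l x le_rfl

lemma step_eq (array : List Int) (i : Nat) (h : i < array.length) :
    convert2dStep array
      (chunkRec (array.take i), ((chunkRec (array.take i)).length : Int) - 1)
      (i : Int)
    = (chunkRec (array.take (i + 1)),
       ((chunkRec (array.take (i + 1))).length : Int) - 1) := by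
  have hlen : (array.take i).length = i := by simp; omega
  have htake : array.take (i + 1) = array.take i ++ [array[i]] := by
    rw [List.take_add_one, List.getElem?_eq_getElem h]
    simp
  have hget : PySem.List.pyGetD array (i : Int) 0 = array[i] := by
    simp [PySem.List.pyGetD, PySem.List.pyGet?, PySem.List.pyIdx?, h]
  have hmod : PySem.Int.mod (i : Int) 4 = ((i % 4 : Nat) : Int) := by
    rw [PySem.Int.mod_eq_emod_of_pos (by norm_num)]
    omega
  rw [htake, chunk_append, hlen]
  set C := chunkRec (array.take i) with hC
  by_cases h4 : i % 4 = 0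
  · rw [if_pos h4]
    unfold convert2dStep
    rw [hmod, h4]
    simp only [Nat.cast_zero, beq_self_eq_true, if_true]
    have hk : ((C.length : Int) - 1 + 1).toNat = C.length := by omega
    rw [hk, modify_append_self, hget]
    rw [Prod.mk.injEq]
    constructor
    · simp
    · simp only [List.length_append, List.length_cons, List.length_nil]
      push_cast
      omega
  · rw [if_neg h4]
    unfold convert2dStep
    rw [hmod]
    have hb : ((((i % 4 : Nat) : Int)) == (0 : Int)) = false := by
      simp
      omega
    rw [hb]
    simp only [Bool.false_eq_true, if_false]
    have hlen1 : 1 ≤ C.length := by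
      rw [hC, chunk_length, hlen]
      omega
    have hk : ((C.length : Int) - 1).toNat = C.length - 1 := by omega
    rw [hk, hget]
    rw [Prod.mk.injEq]
    constructor
    · rfl
    · rw [List.length_modify]

lemma loop_inv : ∀ (fuel : Nat) (array : List Int) (i : Nat),
    array.length - i ≤ fuel → i ≤ array.length →
    (PySem.List.pyRange (i : Int) (array.length : Int) 1).foldl (convert2dStep array)
      (chunkRec (array.take i), ((chunkRec (array.take i)).length : Int) - 1)
    = (chunkRec array, ((chunkRec array).length : Int) - 1) := by
  intro fuel
  induction fuel with
  | zero =>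
    intro array i hf hi
    have : i = array.length := by omega
    subst this
    rw [PySem.List.pyRange_one_eq_nil (by omega)]
    simp
  | succ n ih =>
    intro array i hf hi
    by_cases hlt : i < array.length
    · rw [PySem.List.pyRange_one_cons (by exact_mod_cast hlt)]
      rw [List.foldl_cons, step_eq array i hlt]
      have hcast : ((i : Int) + 1) = ((i + 1 : Nat) : Int) := by push_cast; ring
      rw [hcast]
      exact ih array (i + 1) (by omega) (by omega)
    · have : i = array.length := by omega
      subst this
      rw [PySem.List.pyRange_one_eq_nil (by omega)]
      simp


lemma range_map_eq_chunk : ∀ (n : Nat) (l : List Int), l.length ≤ n →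
    (List.range ((l.length + 3) / 4)).map (fun k => (l.drop (4 * k)).take 4) = chunkRec l := by
  intro n
  induction n with
  | zero =>
    intro l hl
    have : l = [] := List.eq_nil_of_length_eq_zero (by omega)
    subst this
    simp [chunk_nil]
  | succ n ih =>
    intro l hl
    match l with
    | [] => simp [chunk_nil]
    | x :: xs =>
      have hm : ((x :: xs).length + 3) / 4 = ((xs.drop 3).length + 3) / 4 + 1 := by
        simp only [List.length_cons, List.length_drop]
        omega
      rw [hm, List.range_succ_eq_map, List.map_cons, List.map_map]
      have hhead : ((x :: xs).drop (4 * 0)).take 4 = (x :: xs).take 4 := by norm_num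
      have htail : ∀ k, (((x :: xs).drop (4 * (k + 1))).take 4)
          = ((xs.drop 3).drop (4 * k)).take 4 := by
        intro k
        have h1 : (x :: xs).drop (4 * (k + 1)) = ((x :: xs).drop 4).drop (4 * k) := by
          rw [List.drop_drop]
          congr 1
          omega
        rw [h1]
        rfl
      have hmap : (List.range (((xs.drop 3).length + 3) / 4)).map
            ((fun k => ((x :: xs).drop (4 * k)).take 4) ∘ Nat.succ)
          = (List.range (((xs.drop 3).length + 3) / 4)).map
            (fun k => ((xs.drop 3).drop (4 * k)).take 4) := by
        apply List.map_congr_left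
        intro k _
        exact htail k
      rw [hhead, hmap, ih (xs.drop 3) (by simp at hl ⊢; omega), chunk_cons]

lemma alt_eq_chunk (l : List Int) : convert2d_alt l = chunkRec l := by
  unfold convert2d_alt
  rw [PySem.List.pyRange_of_pos 0 (l.length : Int) (by norm_num)]
  have hcount : (if (0:Int) < (l.length : Int)
      then (((l.length : Int) - 0 + 4 - 1) / 4).toNat else 0) = (l.length + 3) / 4 := by
    split_ifs with h
    · omega
    · omega
  rw [hcount, List.map_map]
  refine Eq.trans (List.map_congr_left ?_) (range_map_eq_chunk l.length l le_rfl)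
  intro k _
  show PySem.List.slice l (some (0 + 4 * (k : Int))) (some (0 + 4 * (k : Int) + 4))
      = (l.drop (4 * k)).take 4
  have h1 : (0 + 4 * (k : Int)) = ((4 * k : Nat) : Int) := by push_cast; ring
  rw [h1]
  have h2 : ((4 * k : Nat) : Int) + 4 = ((4 * k : Nat) : Int) + ((4 : Nat) : Int) := by
    norm_num
  rw [h2, PySem.List.slice_natCast_add]

-- ===== VERDICT (by name: the statement is the Claim_ definition above) =====
theorem convert2d_spec : Claim_equal_convert2d := by
  intro array _
  unfold Spec_convert2d convert2d
  have h := loop_inv array.length array 0 (by omega) (by omega)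
  simp only [List.take_zero, Nat.cast_zero, chunk_nil, List.length_nil, zero_sub] at h
  rw [h, alt_eq_chunk]
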